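-- pv_equiv track=rewrite | github.com/alexiosgkikas/DailyCoding | codesPython/coding578.py | doMap
-- ===== SOURCE A (Python) =====
-- def doMap(str1,str2):
--     if len(str1) != len(str2):
--         return False
--     map_dict =dict()
--     index =0
--     while(index<len(str1)):
--         if str1[index] in map_dict:
--             if map_dict[str1[index]] != str2[index]:
--                 return False
--         else:
--             map_dict[str1[index]] =  str2[index]
--
--         index+=1
--     return True
-- ===== SOURCE B (Python) =====
-- def doMap(str1, str2):
--     if len(str1) != len(str2):
--         return False
--     return len(set(zip(str1, str2))) == len(set(str1))
-- ===== Notes on version B (the rewrite author's own statement) =====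
-- stated objective: idiomatic
-- what changed: Replaces the incremental dict-building index loop with an aggregate set-cardinality comparison: the mapping is consistent iff the set of (c1, c2) pairs from zip(str1, str2) has exactly as many elements as the set of distinct characters of str1.
import Mathlib
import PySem

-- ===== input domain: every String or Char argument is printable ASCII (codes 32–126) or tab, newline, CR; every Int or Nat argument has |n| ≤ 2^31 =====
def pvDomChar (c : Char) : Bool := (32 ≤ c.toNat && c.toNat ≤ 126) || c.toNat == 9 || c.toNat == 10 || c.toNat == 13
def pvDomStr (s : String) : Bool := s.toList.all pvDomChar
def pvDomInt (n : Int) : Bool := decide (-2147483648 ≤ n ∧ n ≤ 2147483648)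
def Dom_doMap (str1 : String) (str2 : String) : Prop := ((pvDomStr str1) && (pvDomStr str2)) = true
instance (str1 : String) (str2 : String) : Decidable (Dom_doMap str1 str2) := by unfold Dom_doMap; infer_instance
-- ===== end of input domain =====

-- B replaces A's incremental dict-building index loop with an aggregate comparison:
-- len(set(zip(str1, str2))) == len(set(str1)); objective: idiomatic (same O(n) cost).

-- ===== PORT A =====
-- the while loop of A, advancing through both strings in lockstep with the dict as state
def doMapGo : List Char → List Char → PySem.Dict Char Char → Bool
  | c1 :: r1, c2 :: r2, d =>
      if d.contains c1 then
        if d.get? c1 = some c2 then doMapGo r1 r2 d else false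
      else doMapGo r1 r2 (d.insert c1 c2)
  | _, _, _ => true

def doMap (str1 : String) (str2 : String) : Bool :=
  if PySem.Str.len str1 ≠ PySem.Str.len str2 then false
  else doMapGo str1.toList str2.toList PySem.Dict.empty

-- ===== PORT B =====
def doMap_alt (str1 : String) (str2 : String) : Bool :=
  if PySem.Str.len str1 ≠ PySem.Str.len str2 then false
  else PySem.Set.len (PySem.Set.ofList (str1.toList.zip str2.toList))
         == PySem.Set.len (PySem.Set.ofList str1.toList)

-- ===== PRECONDITION & SPEC =====
def Spec_doMap (str1 : String) (str2 : String) (out : Bool) : Prop := out = doMap_alt str1 str2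
instance (str1 : String) (str2 : String) (out : Bool) : Decidable (Spec_doMap str1 str2 out) := by unfold Spec_doMap; infer_instance

-- ===== CLAIM (what is proved, stated in full; the proofs are below) =====
def Claim_equal_doMap : Prop := ∀ (str1 : String) (str2 : String), Dom_doMap str1 str2 → Spec_doMap str1 str2 (doMap str1 str2)

-- ===== LEMMAS AND PROOFS =====

-- the common characterisation: every two positions with equal first components agree on the second
def Consistent (ps : List (Char × Char)) : Prop :=
  ∀ p ∈ ps, ∀ q ∈ ps, p.1 = q.1 → p.2 = q.2

-- A's loop invariant
lemma doMapGo_true_iff (l1 : List Char) : ∀ (l2 : List Char) (d : PySem.Dict Char Char),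
    (doMapGo l1 l2 d = true ↔
      (Consistent (l1.zip l2) ∧ ∀ p ∈ l1.zip l2, ∀ c, d.get? p.1 = some c → c = p.2)) := by
  induction l1 with
  | nil => intro l2 d; simp [doMapGo, Consistent]
  | cons a r1 ih =>
    intro l2 d
    cases l2 with
    | nil => simp [doMapGo, Consistent]
    | cons b r2 =>
      simp only [List.zip_cons_cons]
      by_cases hc : d.contains a = true
      · by_cases hg : d.get? a = some b
        · rw [doMapGo, if_pos hc, if_pos hg, ih]
          constructor
          · rintro ⟨hcons, hP⟩
            refine ⟨?_, ?_⟩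
            · rintro ⟨px, py⟩ hp ⟨qx, qy⟩ hq h1
              simp only [List.mem_cons, Prod.mk.injEq] at hp hq
              replace h1 : px = qx := h1
              subst h1
              show py = qy
              rcases hp with ⟨rfl, rfl⟩ | hp
              · rcases hq with ⟨-, rfl⟩ | hq
                · rfl
                · exact hP (px, qy) hq py hg
              · rcases hq with ⟨rfl, rfl⟩ | hq
                · exact (hP (px, py) hp qy hg).symm
                · exact hcons (px, py) hp (px, qy) hq rfl
            · rintro ⟨px, py⟩ hp c hgc
              simp only [List.mem_cons, Prod.mk.injEq] at hp
              rcases hp with ⟨rfl, rfl⟩ | hp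
              · exact (Option.some.inj (hg.symm.trans hgc)).symm
              · exact hP (px, py) hp c hgc
          · rintro ⟨hcons, hP⟩
            exact ⟨fun p hp q hq h1 => hcons p (List.mem_cons_of_mem _ hp) q (List.mem_cons_of_mem _ hq) h1,
                   fun p hp c hgc => hP p (List.mem_cons_of_mem _ hp) c hgc⟩
        · rw [doMapGo, if_pos hc, if_neg hg]
          simp only [Bool.false_eq_true, false_iff, not_and]
          intro _ hP
          have hsome := PySem.Dict.contains_eq_isSome_get? d a
          rw [hc] at hsome
          obtain ⟨c, hcv⟩ := Option.isSome_iff_exists.1 hsome.symm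
          have : c = b := hP (a, b) List.mem_cons_self c hcv
          exact hg (this ▸ hcv)
      · have hga : d.get? a = none := by
          have hsome := PySem.Dict.contains_eq_isSome_get? d a
          rw [Bool.not_eq_true] at hc
          rw [hc] at hsome
          exact Option.not_isSome_iff_eq_none.1 (by simp [← hsome])
        rw [doMapGo, if_neg hc, ih]
        constructor
        · rintro ⟨hcons, hP⟩
          refine ⟨?_, ?_⟩
          · rintro ⟨px, py⟩ hp ⟨qx, qy⟩ hq h1
            simp only [List.mem_cons, Prod.mk.injEq] at hp hq
            replace h1 : px = qx := h1
            subst h1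
            show py = qy
            rcases hp with ⟨rfl, rfl⟩ | hp
            · rcases hq with ⟨-, rfl⟩ | hq
              · rfl
              · exact hP (px, qy) hq py (by rw [PySem.Dict.get?_insert, if_pos rfl])
            · rcases hq with ⟨rfl, rfl⟩ | hq
              · exact (hP (px, py) hp qy (by rw [PySem.Dict.get?_insert, if_pos rfl])).symm
              · by_cases hpa : px = a
                · have h2 := hP (px, py) hp b (by rw [PySem.Dict.get?_insert, if_pos hpa])
                  have h3 := hP (px, qy) hq b (by rw [PySem.Dict.get?_insert, if_pos hpa])
                  exact h2.symm.trans h3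
                · exact hcons (px, py) hp (px, qy) hq rfl
          · rintro ⟨px, py⟩ hp c hgc
            simp only [List.mem_cons, Prod.mk.injEq] at hp
            rcases hp with ⟨rfl, rfl⟩ | hp
            · rw [hga] at hgc; cases hgc
            · by_cases hpa : px = a
              · rw [hpa, hga] at hgc; cases hgc
              · exact hP (px, py) hp c (by rwa [PySem.Dict.get?_insert, if_neg hpa])
        · rintro ⟨hcons, hP⟩
          refine ⟨?_, ?_⟩
          · exact fun p hp q hq h1 =>
              hcons p (List.mem_cons_of_mem _ hp) q (List.mem_cons_of_mem _ hq) h1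
          · rintro ⟨px, py⟩ hp c hgc
            rw [PySem.Dict.get?_insert] at hgc
            split_ifs at hgc with hpa
            · have : py = b := hcons (px, py) (List.mem_cons_of_mem _ hp) (a, b) List.mem_cons_self hpa
              rw [this, ← Option.some.inj hgc]
            · exact hP (px, py) (List.mem_cons_of_mem _ hp) c hgc

-- length of a PySem set equals the Finset cardinality of the underlying list's elements
lemma setLen_eq_card {α : Type} [BEq α] [LawfulBEq α] [DecidableEq α] (l : List α) :
    PySem.Set.len (PySem.Set.ofList l) = (l.toFinset.card : Int) := by
  have h1 : (PySem.Set.ofList l).toFinset = l.toFinset := by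
    ext x; simp [PySem.Set.mem_ofList]
  have h2 := List.toFinset_card_of_nodup (PySem.Set.nodup_ofList l)
  rw [h1] at h2
  simp [PySem.Set.len, ← h2]

-- B's cardinality test holds iff the zip is consistent (equal-length strings)
lemma card_eq_iff_consistent (l1 l2 : List Char) (hlen : l1.length = l2.length) :
    ((l1.zip l2).toFinset.card = l1.toFinset.card ↔ Consistent (l1.zip l2)) := by
  have hmap : (l1.zip l2).map Prod.fst = l1 := List.map_fst_zip (le_of_eq hlen)
  have himg : l1.toFinset = (l1.zip l2).toFinset.image Prod.fst := by
    ext x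
    simp only [List.mem_toFinset, Finset.mem_image]
    conv_lhs => rw [← hmap]
    simp [List.mem_map]
  rw [himg, eq_comm, Finset.card_image_iff]
  constructor
  · intro hinj p hp q hq h1
    have := hinj (List.mem_toFinset.2 hp) (List.mem_toFinset.2 hq) h1
    rw [this]
  · intro hcons p hp q hq h1
    exact Prod.ext h1 (hcons p (List.mem_toFinset.1 hp) q (List.mem_toFinset.1 hq) h1)

-- ===== VERDICT (by name: the statement is the Claim_ definition above) =====
theorem doMap_spec : Claim_equal_doMap := by
  intro str1 str2 _
  unfold Spec_doMap doMap doMap_alt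
  by_cases hne : PySem.Str.len str1 ≠ PySem.Str.len str2
  · rw [if_pos hne, if_pos hne]
  · rw [if_neg hne, if_neg hne]
    have hlen : str1.toList.length = str2.toList.length := by
      have := not_not.1 hne
      rw [PySem.Str.len_eq, PySem.Str.len_eq] at this
      exact_mod_cast this
    rw [Bool.eq_iff_iff, beq_iff_eq, setLen_eq_card, setLen_eq_card,
        doMapGo_true_iff]
    rw [show ((((str1.toList.zip str2.toList).toFinset.card : Int) = (str1.toList.toFinset.card : Int)) ↔ ((str1.toList.zip str2.toList).toFinset.card = str1.toList.toFinset.card)) from by exact_mod_cast Iff.rfl]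
    rw [card_eq_iff_consistent _ _ hlen]
    constructor
    · exact fun h => h.1
    · intro h
      exact ⟨h, fun p _ c hc => by rw [PySem.Dict.get?_empty] at hc; exact absurd hc (by simp)⟩
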